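-- pv_equiv track=rewrite | github.com/JohnMakers/metadata-scrubber | app/utils/signature.py | ext_equivalent
-- ===== SOURCE A (Python) =====
-- _EQUIV = {
--     "mp4": {"mp4", "mov", "m4v"},
--     "mkv": {"mkv", "webm"},   # both Matroska container; webm is constrained matroska
-- }
--
-- def ext_equivalent(a: str, b: str) -> bool:
--     """True if extensions are the same or within an equivalence family."""
--     a = a.lstrip(".").lower()
--     b = b.lstrip(".").lower()
--     if a == b: return True
--     for fam in _EQUIV.values():
--         if a in fam and b in fam:
--             return True
--     return False
-- ===== SOURCE B (Python) =====
-- _CANON = {"mov": "mp4", "m4v": "mp4", "webm": "mkv"}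
--
-- def ext_equivalent(a: str, b: str) -> bool:
--     """True if extensions are the same or within an equivalence family."""
--     na = a.lstrip(".").lower()
--     nb = b.lstrip(".").lower()
--     return _CANON.get(na, na) == _CANON.get(nb, nb)
-- ===== Notes on version B (the rewrite author's own statement) =====
-- stated objective: simpler
-- what changed: Replaces the a==b guard plus the loop over equivalence families with a flat canonical-mapping dict: each extension is sent to its family representative and the two canonical forms are compared once.
import Mathlib
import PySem

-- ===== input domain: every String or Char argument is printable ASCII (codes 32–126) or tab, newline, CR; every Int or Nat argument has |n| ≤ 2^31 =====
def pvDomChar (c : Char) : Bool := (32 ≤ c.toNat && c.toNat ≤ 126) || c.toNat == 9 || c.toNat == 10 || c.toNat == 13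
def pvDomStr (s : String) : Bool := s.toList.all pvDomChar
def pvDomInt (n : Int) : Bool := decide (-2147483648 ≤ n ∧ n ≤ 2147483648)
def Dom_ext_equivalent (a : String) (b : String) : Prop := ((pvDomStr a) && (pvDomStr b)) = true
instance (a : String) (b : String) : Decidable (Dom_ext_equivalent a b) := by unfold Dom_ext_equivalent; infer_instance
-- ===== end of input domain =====

-- B replaces the a==b guard plus the loop over equivalence families with one
-- canonical-mapping dict lookup per argument (objective: simpler).

-- ===== PORT A =====
-- s.lstrip(".").lower(): lstrip with the single char '.' is dropWhile (= '.')
-- on the code points (exact), then PySem.Str.lower.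
def pvNormExt (s : String) : String :=
  PySem.Str.lower (String.ofList (s.toList.dropWhile (· == '.')))

-- _EQUIV.values(): the two family sets, in dict order (distinct elements)
def pvFams : List (List String) := [["mp4", "mov", "m4v"], ["mkv", "webm"]]

-- the 'for fam in _EQUIV.values(): if a in fam and b in fam: return True' loop
def pvFamLoop (a b : String) : List (List String) → Bool
  | [] => false
  | fam :: rest => if fam.contains a && fam.contains b then true else pvFamLoop a b rest

def ext_equivalent (a : String) (b : String) : Bool :=
  let a' := pvNormExt a
  let b' := pvNormExt b
  if a' == b' then true else pvFamLoop a' b' pvFams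

-- ===== PORT B =====
def pvCanon : PySem.Dict String String :=
  PySem.Dict.ofList [("mov", "mp4"), ("m4v", "mp4"), ("webm", "mkv")]

def ext_equivalent_alt (a : String) (b : String) : Bool :=
  let na := pvNormExt a
  let nb := pvNormExt b
  pvCanon.getD na na == pvCanon.getD nb nb

-- ===== PRECONDITION & SPEC =====
def Spec_ext_equivalent (a : String) (b : String) (out : Bool) : Prop := out = ext_equivalent_alt a b
instance (a : String) (b : String) (out : Bool) : Decidable (Spec_ext_equivalent a b out) := by unfold Spec_ext_equivalent; infer_instance

-- ===== CLAIM (what is proved, stated in full; the proofs are below) =====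
def Claim_equal_ext_equivalent : Prop := ∀ (a : String) (b : String), Dom_ext_equivalent a b → Spec_ext_equivalent a b (ext_equivalent a b)

-- ===== LEMMAS AND PROOFS =====

-- canonicalization as B's dict computes it
lemma pvCanon_getD (x : String) :
    pvCanon.getD x x =
      if x = "mov" then "mp4" else if x = "m4v" then "mp4"
      else if x = "webm" then "mkv" else x := by
  have h : pvCanon = PySem.Dict.mk [("mov", "mp4"), ("m4v", "mp4"), ("webm", "mkv")] := by rfl
  rw [h]
  simp only [PySem.Dict.getD, PySem.Dict.get?_mk_cons]
  split_ifs <;> simp_all [beq_iff_eq, PySem.Dict.get?]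

-- the family loop of A, evaluated on the two literal families
lemma pvFamLoop_eval (x y : String) :
    pvFamLoop x y pvFams =
      (((x == "mp4" || x == "mov" || x == "m4v") && (y == "mp4" || y == "mov" || y == "m4v")) ||
       ((x == "mkv" || x == "webm") && (y == "mkv" || y == "webm"))) := by
  simp only [pvFams, pvFamLoop, List.contains_cons, List.contains_nil, Bool.or_false]
  split_ifs <;> simp_all <;> tauto

-- the core equality, for arbitrary (already normalized) strings
lemma pvCore (x y : String) :
    (if x == y then true else pvFamLoop x y pvFams) =
      (pvCanon.getD x x == pvCanon.getD y y) := by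
  rw [pvCanon_getD, pvCanon_getD, pvFamLoop_eval]
  by_cases hx1 : x = "mp4" <;> by_cases hx2 : x = "mov" <;> by_cases hx3 : x = "m4v" <;>
    by_cases hx4 : x = "mkv" <;> by_cases hx5 : x = "webm" <;>
    by_cases hy1 : y = "mp4" <;> by_cases hy2 : y = "mov" <;> by_cases hy3 : y = "m4v" <;>
    by_cases hy4 : y = "mkv" <;> by_cases hy5 : y = "webm" <;>
    simp_all [beq_eq_decide, @eq_comm String]

-- ===== VERDICT (by name: the statement is the Claim_ definition above) =====
theorem ext_equivalent_spec : Claim_equal_ext_equivalent := by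
  intro a b _
  unfold Spec_ext_equivalent ext_equivalent ext_equivalent_alt
  exact pvCore (pvNormExt a) (pvNormExt b)
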